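-- pv_equiv track=rewrite | github.com/jienfak/playground | py/old/crypt/xor/main.py | uncrypt_xor
-- ===== SOURCE A (Python) =====
-- def uncrypt_xor(crypt, key):
--     string = ''
--     for charc in crypt:
--         charbuff = charc
--         for chark in reversed(key):
--             charbuff = chr(ord(charbuff)^ord(chark))
--         string +=charbuff
--     return string
-- ===== SOURCE B (Python) =====
-- def uncrypt_xor(crypt, key):
--     k = 0
--     for ch in key:
--         k ^= ord(ch)
--     return ''.join(chr(ord(c) ^ k) for c in crypt)
-- ===== Notes on version B (the rewrite author's own statement) =====
-- stated objective: faster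
-- what changed: Instead of XOR-ing every ciphertext character with each key character in a nested loop, B folds the whole key into one combined XOR value once and then does a single pass over the ciphertext (XOR is associative/commutative, so order and the reversal are irrelevant).
import Mathlib
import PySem

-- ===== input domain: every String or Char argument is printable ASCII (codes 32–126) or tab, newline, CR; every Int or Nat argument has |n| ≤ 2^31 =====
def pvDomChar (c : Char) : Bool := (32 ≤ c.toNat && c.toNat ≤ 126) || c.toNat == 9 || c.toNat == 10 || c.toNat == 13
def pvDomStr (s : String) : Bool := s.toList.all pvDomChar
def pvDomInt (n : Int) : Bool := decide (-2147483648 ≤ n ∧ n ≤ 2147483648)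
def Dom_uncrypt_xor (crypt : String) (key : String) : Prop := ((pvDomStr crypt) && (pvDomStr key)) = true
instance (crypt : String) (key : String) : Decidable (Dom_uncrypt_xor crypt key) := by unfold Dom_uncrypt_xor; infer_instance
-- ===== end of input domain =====

-- B replaces A's nested per-character loop over the key by one precomputed combined
-- key XOR and a single pass over the ciphertext (objective: faster, O(n+m) vs O(n*m)).

-- ===== PORT A =====
-- literal port of A: for each charc in crypt, fold chr(ord(charbuff)^ord(chark))
-- over reversed(key), appending the result to the accumulated string
def uncrypt_xor (crypt : String) (key : String) : String :=
  String.ofList (crypt.toList.foldl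
    (fun (string : List Char) (charc : Char) =>
      string ++ [key.toList.reverse.foldl
        (fun (charbuff : Char) (chark : Char) => Char.ofNat (charbuff.toNat ^^^ chark.toNat))
        charc])
    [])

-- ===== PORT B =====
-- literal port of Source B: fold the key into one XOR value, then map over crypt
def uncrypt_xor_alt (crypt : String) (key : String) : String :=
  let k : Nat := key.toList.foldl (fun (a : Nat) (ch : Char) => a ^^^ ch.toNat) 0
  String.ofList (crypt.toList.map (fun (c : Char) => Char.ofNat (c.toNat ^^^ k)))

-- ===== PRECONDITION & SPEC =====
def Spec_uncrypt_xor (crypt : String) (key : String) (out : String) : Prop := out = uncrypt_xor_alt crypt key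
instance (crypt : String) (key : String) (out : String) : Decidable (Spec_uncrypt_xor crypt key out) := by unfold Spec_uncrypt_xor; infer_instance

-- ===== CLAIM (what is proved, stated in full; the proofs are below) =====
def Claim_equal_uncrypt_xor : Prop := ∀ (crypt : String) (key : String), Dom_uncrypt_xor crypt key → Spec_uncrypt_xor crypt key (uncrypt_xor crypt key)

-- ===== LEMMAS AND PROOFS =====

-- folding nat-xor: an initial xor can be pulled out of the fold
theorem pv_natfold_shift (l : List Char) : ∀ (a x : Nat),
    l.foldl (fun (a : Nat) (ch : Char) => a ^^^ ch.toNat) (a ^^^ x)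
      = (l.foldl (fun (a : Nat) (ch : Char) => a ^^^ ch.toNat) a) ^^^ x := by
  induction l with
  | nil => intro a x; simp
  | cons h t ih =>
    intro a x
    simp only [List.foldl_cons]
    rw [show (a ^^^ x) ^^^ h.toNat = (a ^^^ h.toNat) ^^^ x by
      rw [Nat.xor_assoc, Nat.xor_assoc, Nat.xor_comm x]]
    exact ih _ x

-- folding nat-xor over the reversed list gives the same value
theorem pv_natfold_reverse (l : List Char) : ∀ (a : Nat),
    l.reverse.foldl (fun (a : Nat) (ch : Char) => a ^^^ ch.toNat) a
      = l.foldl (fun (a : Nat) (ch : Char) => a ^^^ ch.toNat) a := by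
  induction l with
  | nil => intro a; simp
  | cons h t ih =>
    intro a
    simp only [List.reverse_cons, List.foldl_append, List.foldl_cons, List.foldl_nil,
      List.foldl_cons]
    rw [ih a, ← pv_natfold_shift t a h.toNat]

-- A's inner character fold equals one Char.ofNat of the xor-fold, for sub-128 codes
theorem pv_charfold (l : List Char) : ∀ (a : Char), a.toNat < 128 →
    (∀ ch ∈ l, ch.toNat < 128) →
    l.foldl (fun (charbuff : Char) (chark : Char) =>
        Char.ofNat (charbuff.toNat ^^^ chark.toNat)) a
      = Char.ofNat (a.toNat ^^^ l.foldl (fun (a : Nat) (ch : Char) => a ^^^ ch.toNat) 0) := by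
  induction l with
  | nil =>
    intro a ha _
    simp only [List.foldl_nil, Nat.xor_zero]
    exact (Char.ofNat_toNat a).symm
  | cons h t ih =>
    intro a ha hmem
    have hh : h.toNat < 128 := hmem h (List.mem_cons_self)
    have hx : a.toNat ^^^ h.toNat < 128 := by
      have := Nat.xor_lt_two_pow (n := 7) (by simpa using ha) (by simpa using hh)
      simpa using this
    have hvalid : (Char.ofNat (a.toNat ^^^ h.toNat)).toNat = a.toNat ^^^ h.toNat := by
      rw [Char.toNat_ofNat]
      simp only [if_pos (show (a.toNat ^^^ h.toNat).isValidChar from Or.inl (by omega))]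
    simp only [List.foldl_cons]
    rw [ih (Char.ofNat (a.toNat ^^^ h.toNat)) (by rw [hvalid]; exact hx)
        (fun ch hc => hmem ch (List.mem_cons_of_mem _ hc)), hvalid]
    congr 1
    have hs := pv_natfold_shift t 0 h.toNat
    simp only [Nat.zero_xor] at hs ⊢
    rw [hs, Nat.xor_assoc, Nat.xor_comm h.toNat]

-- the append-accumulator fold is a map
theorem pv_foldl_append_map (l : List Char) (f : Char → Char) : ∀ (acc : List Char),
    l.foldl (fun (s : List Char) (c : Char) => s ++ [f c]) acc = acc ++ l.map f := by
  induction l with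
  | nil => intro acc; simp
  | cons h t ih => intro acc; simp [ih]

theorem pv_dom_lt (c : Char) (h : pvDomChar c = true) : c.toNat < 128 := by
  unfold pvDomChar at h
  simp only [Bool.or_eq_true, Bool.and_eq_true, decide_eq_true_eq, beq_iff_eq] at h
  omega

-- ===== VERDICT (by name: the statement is the Claim_ definition above) =====
theorem uncrypt_xor_spec : Claim_equal_uncrypt_xor := by
  intro crypt key hdom
  unfold Spec_uncrypt_xor uncrypt_xor uncrypt_xor_alt
  unfold Dom_uncrypt_xor at hdom
  simp only [Bool.and_eq_true] at hdom
  obtain ⟨hc, hk⟩ := hdom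
  have hkey : ∀ ch ∈ key.toList, ch.toNat < 128 := by
    intro ch hm
    unfold pvDomStr at hk
    exact pv_dom_lt ch ((List.all_eq_true.mp hk) ch hm)
  rw [pv_foldl_append_map]
  congr 1
  apply List.map_congr_left
  intro c hcm
  have hclt : c.toNat < 128 := by
    unfold pvDomStr at hc
    exact pv_dom_lt c ((List.all_eq_true.mp hc) c hcm)
  rw [pv_charfold key.toList.reverse c hclt
      (fun ch hm => hkey ch (List.mem_reverse.mp hm)),
    pv_natfold_reverse]
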